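-- pv_equiv track=rewrite | github.com/kiritowu/aoc-2023 | src/01.py | part2
-- ===== SOURCE A (Python) =====
-- from typing import List
--
-- def part1(lines: List[str]) -> int:
--     """
--     The newly-improved calibration document consists of lines of text;
--     each line originally contained a specific calibration value that
--     the Elves now need to recover. On each line, the calibration value
--     can be found by combining the first digit and the last digit
--     (in that order) to form a single two-digit number.
--
--     For example:
--
--     1abc2
--     pqr3stu8vwx
--     a1b2c3d4e5f
--     treb7uchet
--
--     In this example, the calibration values of these four lines are
--     12, 38, 15, and 77. Adding these together produces 142.
--
--     Consider your entire calibration document.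
--     What is the sum of all of the calibration values?
--     """
--     total = 0
--     for line in lines:
--         # Two-Pointer to find the digits
--         l, r = 0, len(line) - 1
--         while l <= r:
--             if not line[l].isdigit():
--                 l += 1
--             elif not line[r].isdigit():
--                 r -= 1
--             else:
--                 total += int(line[l] + line[r])
--                 break
--     return total
--
-- def part2(lines: List[str]) -> int:
--     """
--     Your calculation isn't quite right. It looks like some of the digits are
--     actually spelled out with letters: one, two, three, four, five, six, seven,
--     eight, and nine also count as valid "digits".
--
--     Equipped with this new information, you now need to find the real first
--     and last digit on each line. For example:
--
--     two1nine
--     eightwothree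
--     abcone2threexyz
--     xtwone3four
--     4nineeightseven2
--     zoneight234
--     7pqrstsixteen
--
--     In this example, the calibration values are 29, 83, 13, 24, 42, 14, and
--     76. Adding these together produces 281.
--
--     What is the sum of all of the calibration values?
--     """
--     # Seach and replace the words with the numbers
--     # Instead of replacing directly to digit, a fuzzy replacement is used
--     # to avoid replacing the digits that are part of other digits
--     str2num = {
--         "one": "o1ne",
--         "two": "t2wo",
--         "three": "th3ree",
--         "four": "f4our",
--         "five": "f5ive",
--         "six": "s6ix",
--         "seven": "se7ven",
--         "eight": "eig8ht",
--         "nine": "ni9ne",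
--         "zero": "ze0ro",
--     }
--     results = []
--     for line in lines:
--         for word, num in str2num.items():
--             line = line.replace(word, num)
--         results.append(line)
--     return part1(results)
-- ===== SOURCE B (Python) =====
-- from typing import List
--
-- WORDS = {
--     "one": 1, "two": 2, "three": 3, "four": 4, "five": 5,
--     "six": 6, "seven": 7, "eight": 8, "nine": 9, "zero": 0,
-- }
--
-- def _value_at(line: str, i: int):
--     # value readable at index i: a literal digit, or a spelled-out word starting here
--     c = line[i]
--     if c.isdigit():
--         return int(c)
--     for word, num in WORDS.items():
--         if line[i:].startswith(word):
--             return num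
--     return None
--
-- def part2(lines: List[str]) -> int:
--     # Single scan of each original line (no string rewriting): take the value at
--     # every index (overlaps allowed: the index always advances by one) and add
--     # 10*first + last; a line with no value contributes 0.
--     total = 0
--     for line in lines:
--         first = None
--         last = None
--         for i in range(len(line)):
--             v = _value_at(line, i)
--             if v is not None:
--                 if first is None:
--                     first = v
--                 last = v
--         if first is not None:
--             total += 10 * first + last
--     return total
-- ===== Notes on version B (the rewrite author's own statement) =====
-- stated objective: alternative
-- what changed: Instead of rewriting each line ten times with fuzzy word-to-digit replacements and then running the part1 two-pointer digit search over the rewritten lines, B makes a single left-to-right scan of each original line, reading a value at every index from a literal digit or a spelled-out word starting there (overlaps allowed since the index advances one position at a time), and accumulates 10*first+last directly.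
import Mathlib
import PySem

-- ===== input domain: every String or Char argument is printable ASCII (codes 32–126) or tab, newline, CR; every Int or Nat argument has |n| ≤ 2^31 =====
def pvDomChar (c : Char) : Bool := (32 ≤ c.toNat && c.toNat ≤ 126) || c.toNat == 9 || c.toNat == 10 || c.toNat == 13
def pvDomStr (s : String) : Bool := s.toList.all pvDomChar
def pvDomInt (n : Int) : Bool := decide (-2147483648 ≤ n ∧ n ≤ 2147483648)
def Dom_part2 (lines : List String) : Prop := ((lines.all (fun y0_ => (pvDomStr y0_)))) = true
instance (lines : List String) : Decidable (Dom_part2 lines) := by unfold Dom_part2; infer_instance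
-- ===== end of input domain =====

-- ===== PORT A =====
-- B makes a single left-to-right scan of each line (digits and spelled words read
-- in place, overlaps allowed) instead of A's ten fuzzy string replacements followed
-- by the part1 two-pointer search; same values on every input (alternative, not faster).

-- the dict str2num of part2, as an association list in insertion order
def str2num : List (String × String) :=
  [("one", "o1ne"), ("two", "t2wo"), ("three", "th3ree"), ("four", "f4our"),
   ("five", "f5ive"), ("six", "s6ix"), ("seven", "se7ven"), ("eight", "eig8ht"),
   ("nine", "ni9ne"), ("zero", "ze0ro")]

-- the while-loop of part1 (two pointers l, r; returns the updated total).
-- The `| _, _ => total` arm is unreachable: the loop keeps 0 <= l <= r < len cs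
-- whenever it reads, so Python never raises there.
def part1Go (cs : List Char) (total : Int) (l r : Int) : Int :=
  if _h : l ≤ r then
    match PySem.List.pyGet? cs l, PySem.List.pyGet? cs r with
    | some a, some b =>
      if PySem.Chars.isdigit a = false then part1Go cs total (l + 1) r
      else if PySem.Chars.isdigit b = false then part1Go cs total l (r - 1)
      else total + (PySem.Int.ofChars? [a, b]).getD 0
    | _, _ => total
  else total
termination_by (r - l + 1).toNat
decreasing_by all_goals omega

def part1 (lines : List String) : Int :=
  lines.foldl (fun total line => part1Go line.toList total 0 (PySem.Str.len line - 1)) 0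

def part2 (lines : List String) : Int :=
  let results := lines.foldl
    (fun acc line => acc ++ [str2num.foldl (fun l p => PySem.Str.replace l p.1 p.2) line]) []
  part1 results

-- ===== PORT B =====
-- the dict WORDS of Source B, as an association list in insertion order
def wordVals : List (List Char × Int) :=
  [("one".toList, 1), ("two".toList, 2), ("three".toList, 3), ("four".toList, 4),
   ("five".toList, 5), ("six".toList, 6), ("seven".toList, 7), ("eight".toList, 8),
   ("nine".toList, 9), ("zero".toList, 0)]

-- _value_at(line, i): a literal digit at i, else the first spelled word starting at i
def valueAt (cs : List Char) (i : Int) : Option Int :=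
  let c := PySem.List.pyGetD cs i ' '
  if PySem.Chars.isdigit c then some ((PySem.Int.ofChars? [c]).getD 0)
  else wordVals.findSome? (fun p =>
    if PySem.Chars.startswith (PySem.List.slice cs (some i) none) p.1 then some p.2 else none)

def part2_alt (lines : List String) : Int :=
  lines.foldl (fun total line =>
    let cs := line.toList
    let fl := (PySem.List.pyRange 0 (PySem.Str.len line) 1).foldl
      (fun (fl : Option Int × Option Int) i =>
        match valueAt cs i with
        | none => fl
        | some v => (some (fl.1.getD v), some v)) (none, none)
    match fl.1, fl.2 with
    | some f, some l => total + (10 * f + l)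
    | _, _ => total) 0

-- ===== PRECONDITION & SPEC =====
def Spec_part2 (lines : List String) (out : Int) : Prop := out = part2_alt lines
instance (lines : List String) (out : Int) : Decidable (Spec_part2 lines out) := by unfold Spec_part2; infer_instance

-- ===== CLAIM (what is proved, stated in full; the proofs are below) =====
def Claim_equal_part2 : Prop := ∀ (lines : List String), Dom_part2 lines → Spec_part2 lines (part2 lines)

-- ===== LEMMAS AND PROOFS =====

set_option maxRecDepth 4096

def drep (o : Char) (os new : List Char) : List Char → List Char
  | [] => []
  | c :: t =>
    if (o :: os).isPrefixOf (c :: t) then new ++ drep o os new (t.drop os.length)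
    else c :: drep o os new t
termination_by l => l.length
decreasing_by
  all_goals simp [List.length_drop]

theorem drep_nil (o : Char) (os new : List Char) : drep o os new [] = [] := by simp [drep]

theorem drep_cons_not (o : Char) (os new : List Char) {c : Char} {t : List Char}
    (h : ¬ (o :: os).isPrefixOf (c :: t) = true) :
    drep o os new (c :: t) = c :: drep o os new t := by
  rw [drep]; simp [h]

theorem drep_cons_match (o : Char) (os new : List Char) {c : Char} {t : List Char}
    (h : (o :: os).isPrefixOf (c :: t) = true) :
    drep o os new (c :: t) = new ++ drep o os new (t.drop os.length) := by
  rw [drep]; simp [h]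

theorem go_eq (o : Char) (os new : List Char) :
    ∀ (fuel : Nat) (l acc : List Char), l.length ≤ fuel →
      PySem.Chars.replace.go (o :: os) new fuel l acc = acc.reverse ++ drep o os new l := by
  intro fuel
  induction fuel with
  | zero =>
    intro l acc h
    cases l with
    | nil => simp [PySem.Chars.replace.go, drep_nil]
    | cons c t => simp at h
  | succ n ih =>
    intro l acc h
    cases l with
    | nil => simp [PySem.Chars.replace.go, drep_nil]
    | cons c t =>
      rw [PySem.Chars.replace.go]
      by_cases hp : (o :: os).isPrefixOf (c :: t) = true
      · simp only [hp, if_true]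
        rw [drep_cons_match o os new hp, ih]
        · simp
        · simp [List.length_drop] at h ⊢; omega
      · simp only [hp]
        rw [ih t (c :: acc) (by simp at h ⊢; omega), drep_cons_not o os new hp]
        simp

theorem rep_eq (o : Char) (os new : List Char) (s : List Char) :
    PySem.Chars.replace s (o :: os) new = drep o os new s := by
  rw [PySem.Chars.replace]
  simp [go_eq o os new s.length s [] (le_refl _)]

theorem prefix_through_digit {d : Char} (hd : PySem.Chars.isdigit d = true) :
    ∀ (A : List Char) (p : List Char) (B : List Char),
      (∀ x ∈ p, PySem.Chars.isdigit x = false) → p.isPrefixOf (A ++ d :: B) = true →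
      p.isPrefixOf A = true := by
  intro A
  induction A with
  | nil =>
    intro p B hq hp
    cases p with
    | nil => simp
    | cons x p' =>
      simp at hp
      exfalso
      have := hq x (by simp)
      rw [hp.1] at this
      rw [hd] at this
      exact absurd this (by simp)
  | cons a A' ih =>
    intro p B hq hp
    cases p with
    | nil => simp
    | cons x p' =>
      simp at hp ⊢
      exact ⟨hp.1, List.isPrefixOf_iff_prefix.mp (ih p' B (fun y hy => hq y (by simp [hy])) (List.isPrefixOf_iff_prefix.mpr hp.2))⟩

theorem drep_reflect (o : Char) (os new : List Char) (k : Nat) (d : Char)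
    (hshape : new = (o :: os).take k ++ d :: (o :: os).drop k)
    (hd : PySem.Chars.isdigit d = true) :
    ∀ (u q : List Char), (∀ x ∈ q, PySem.Chars.isdigit x = false) →
      q.isPrefixOf (drep o os new u) = true → q.isPrefixOf u = true := by
  intro u
  induction u with
  | nil => intro q hq h; rw [drep_nil] at h; cases q with
    | nil => simp
    | cons x q' => simp at h
  | cons c t ih =>
    intro q hq h
    by_cases hp : (o :: os).isPrefixOf (c :: t) = true
    · rw [drep_cons_match o os new hp] at h
      rw [hshape] at h
      rw [List.append_assoc] at h
      have h1 : q.isPrefixOf ((o :: os).take k) = true :=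
        prefix_through_digit hd _ q _ hq h
      -- q ≤ take k ≤ (o::os) ≤ (c::t)
      have h2 : q <+: (o :: os) := List.IsPrefix.trans
        (List.isPrefixOf_iff_prefix.mp h1) (List.take_prefix k _)
      have h3 : q <+: (c :: t) := h2.trans (List.isPrefixOf_iff_prefix.mp hp)
      exact List.isPrefixOf_iff_prefix.mpr h3
    · rw [drep_cons_not o os new hp] at h
      cases q with
      | nil => simp
      | cons x q' =>
        simp at h ⊢
        exact ⟨h.1, List.isPrefixOf_iff_prefix.mp (ih q' (fun y hy => hq y (by simp [hy])) (List.isPrefixOf_iff_prefix.mpr h.2))⟩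

theorem drep_cons_head (o : Char) (os new : List Char) (hh : new.head? = some o)
    (c : Char) (u : List Char) : ∃ z, drep o os new (c :: u) = c :: z := by
  by_cases hp : (o :: os).isPrefixOf (c :: u) = true
  · rw [drep_cons_match o os new hp]
    have hoc : o = c := by simp [List.isPrefixOf] at hp; exact hp.1
    cases new with
    | nil => simp at hh
    | cons n ntail =>
      simp at hh
      refine ⟨ntail ++ drep o os (n :: ntail) (u.drop os.length), ?_⟩
      subst hh hoc
      simp
  · rw [drep_cons_not o os new hp]
    exact ⟨_, rfl⟩

def S1 (cs : List Char) : List Char := drep 'o' ['n','e'] ['o','1','n','e'] cs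
def S2 (cs : List Char) : List Char := drep 't' ['w','o'] ['t','2','w','o'] (S1 cs)
def S3 (cs : List Char) : List Char := drep 't' ['h','r','e','e'] ['t','h','3','r','e','e'] (S2 cs)
def S4 (cs : List Char) : List Char := drep 'f' ['o','u','r'] ['f','4','o','u','r'] (S3 cs)
def S5 (cs : List Char) : List Char := drep 'f' ['i','v','e'] ['f','5','i','v','e'] (S4 cs)
def S6 (cs : List Char) : List Char := drep 's' ['i','x'] ['s','6','i','x'] (S5 cs)
def S7 (cs : List Char) : List Char := drep 's' ['e','v','e','n'] ['s','e','7','v','e','n'] (S6 cs)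
def S8 (cs : List Char) : List Char := drep 'e' ['i','g','h','t'] ['e','i','g','8','h','t'] (S7 cs)
def S9 (cs : List Char) : List Char := drep 'n' ['i','n','e'] ['n','i','9','n','e'] (S8 cs)
def applyAll (cs : List Char) : List Char := drep 'z' ['e','r','o'] ['z','e','0','r','o'] (S9 cs)

-- reflection through each stage: a letters-only prefix of the processed string was a prefix already
theorem refl1 : ∀ {u q : List Char}, (∀ x ∈ q, PySem.Chars.isdigit x = false) →
    q.isPrefixOf (S1 u) = true → q.isPrefixOf u = true :=
  fun hq h => drep_reflect 'o' ['n','e'] _ 1 '1' rfl (by decide) _ _ hq h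
theorem refl2 : ∀ {u q : List Char}, (∀ x ∈ q, PySem.Chars.isdigit x = false) →
    q.isPrefixOf (S2 u) = true → q.isPrefixOf u = true :=
  fun hq h => refl1 hq (drep_reflect 't' ['w','o'] _ 1 '2' rfl (by decide) _ _ hq h)
theorem refl3 : ∀ {u q : List Char}, (∀ x ∈ q, PySem.Chars.isdigit x = false) →
    q.isPrefixOf (S3 u) = true → q.isPrefixOf u = true :=
  fun hq h => refl2 hq (drep_reflect 't' ['h','r','e','e'] _ 2 '3' rfl (by decide) _ _ hq h)
theorem refl4 : ∀ {u q : List Char}, (∀ x ∈ q, PySem.Chars.isdigit x = false) →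
    q.isPrefixOf (S4 u) = true → q.isPrefixOf u = true :=
  fun hq h => refl3 hq (drep_reflect 'f' ['o','u','r'] _ 1 '4' rfl (by decide) _ _ hq h)
theorem refl5 : ∀ {u q : List Char}, (∀ x ∈ q, PySem.Chars.isdigit x = false) →
    q.isPrefixOf (S5 u) = true → q.isPrefixOf u = true :=
  fun hq h => refl4 hq (drep_reflect 'f' ['i','v','e'] _ 1 '5' rfl (by decide) _ _ hq h)
theorem refl6 : ∀ {u q : List Char}, (∀ x ∈ q, PySem.Chars.isdigit x = false) →
    q.isPrefixOf (S6 u) = true → q.isPrefixOf u = true :=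
  fun hq h => refl5 hq (drep_reflect 's' ['i','x'] _ 1 '6' rfl (by decide) _ _ hq h)
theorem refl7 : ∀ {u q : List Char}, (∀ x ∈ q, PySem.Chars.isdigit x = false) →
    q.isPrefixOf (S7 u) = true → q.isPrefixOf u = true :=
  fun hq h => refl6 hq (drep_reflect 's' ['e','v','e','n'] _ 2 '7' rfl (by decide) _ _ hq h)
theorem refl8 : ∀ {u q : List Char}, (∀ x ∈ q, PySem.Chars.isdigit x = false) →
    q.isPrefixOf (S8 u) = true → q.isPrefixOf u = true :=
  fun hq h => refl7 hq (drep_reflect 'e' ['i','g','h','t'] _ 3 '8' rfl (by decide) _ _ hq h)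
theorem refl9 : ∀ {u q : List Char}, (∀ x ∈ q, PySem.Chars.isdigit x = false) →
    q.isPrefixOf (S9 u) = true → q.isPrefixOf u = true :=
  fun hq h => refl8 hq (drep_reflect 'n' ['i','n','e'] _ 2 '9' rfl (by decide) _ _ hq h)

theorem not_prefix_lift {c : Char} {t X : List Char} (w : Char) (ws : List Char)
    (href : ∀ {q : List Char}, (∀ x ∈ q, PySem.Chars.isdigit x = false) →
      q.isPrefixOf X = true → q.isPrefixOf t = true)
    (hnd : ∀ x ∈ ws, PySem.Chars.isdigit x = false)
    (h : ¬(w :: ws).isPrefixOf (c :: t) = true) : ¬(w :: ws).isPrefixOf (c :: X) = true := by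
  intro hp
  rw [List.isPrefixOf_iff_prefix, List.cons_prefix_cons] at hp
  apply h
  rw [List.isPrefixOf_iff_prefix, List.cons_prefix_cons]
  exact ⟨hp.1, List.isPrefixOf_iff_prefix.mp (href hnd (List.isPrefixOf_iff_prefix.mpr hp.2))⟩

theorem applyAll_cons_noword (c : Char) (t : List Char)
    (h1 : ¬['o','n','e'].isPrefixOf (c :: t) = true)
    (h2 : ¬['t','w','o'].isPrefixOf (c :: t) = true)
    (h3 : ¬['t','h','r','e','e'].isPrefixOf (c :: t) = true)
    (h4 : ¬['f','o','u','r'].isPrefixOf (c :: t) = true)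
    (h5 : ¬['f','i','v','e'].isPrefixOf (c :: t) = true)
    (h6 : ¬['s','i','x'].isPrefixOf (c :: t) = true)
    (h7 : ¬['s','e','v','e','n'].isPrefixOf (c :: t) = true)
    (h8 : ¬['e','i','g','h','t'].isPrefixOf (c :: t) = true)
    (h9 : ¬['n','i','n','e'].isPrefixOf (c :: t) = true)
    (h10 : ¬['z','e','r','o'].isPrefixOf (c :: t) = true) :
    applyAll (c :: t) = c :: applyAll t := by
  have e1 : S1 (c :: t) = c :: S1 t := drep_cons_not _ _ _ h1
  have e2 : S2 (c :: t) = c :: S2 t := by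
    unfold S2; rw [e1]
    exact drep_cons_not _ _ _ (not_prefix_lift 't' _ (fun hq h => refl1 hq h) (by intro x hx; fin_cases hx <;> decide) h2)
  have e3 : S3 (c :: t) = c :: S3 t := by
    unfold S3; rw [e2]
    exact drep_cons_not _ _ _ (not_prefix_lift 't' _ (fun hq h => refl2 hq h) (by intro x hx; fin_cases hx <;> decide) h3)
  have e4 : S4 (c :: t) = c :: S4 t := by
    unfold S4; rw [e3]
    exact drep_cons_not _ _ _ (not_prefix_lift 'f' _ (fun hq h => refl3 hq h) (by intro x hx; fin_cases hx <;> decide) h4)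
  have e5 : S5 (c :: t) = c :: S5 t := by
    unfold S5; rw [e4]
    exact drep_cons_not _ _ _ (not_prefix_lift 'f' _ (fun hq h => refl4 hq h) (by intro x hx; fin_cases hx <;> decide) h5)
  have e6 : S6 (c :: t) = c :: S6 t := by
    unfold S6; rw [e5]
    exact drep_cons_not _ _ _ (not_prefix_lift 's' _ (fun hq h => refl5 hq h) (by intro x hx; fin_cases hx <;> decide) h6)
  have e7 : S7 (c :: t) = c :: S7 t := by
    unfold S7; rw [e6]
    exact drep_cons_not _ _ _ (not_prefix_lift 's' _ (fun hq h => refl6 hq h) (by intro x hx; fin_cases hx <;> decide) h7)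
  have e8 : S8 (c :: t) = c :: S8 t := by
    unfold S8; rw [e7]
    exact drep_cons_not _ _ _ (not_prefix_lift 'e' _ (fun hq h => refl7 hq h) (by intro x hx; fin_cases hx <;> decide) h8)
  have e9 : S9 (c :: t) = c :: S9 t := by
    unfold S9; rw [e8]
    exact drep_cons_not _ _ _ (not_prefix_lift 'n' _ (fun hq h => refl8 hq h) (by intro x hx; fin_cases hx <;> decide) h9)
  unfold applyAll; rw [e9]
  exact drep_cons_not _ _ _ (not_prefix_lift 'z' _ (fun hq h => refl9 hq h) (by intro x hx; fin_cases hx <;> decide) h10)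

theorem drep_concrete_block (o : Char) (os new : List Char) (p X : List Char)
    (hnm : ∀ i, i < p.length → ¬(o :: os).isPrefixOf (p.drop i ++ X) = true) :
    drep o os new (p ++ X) = p ++ drep o os new X := by
  induction p with
  | nil => simp
  | cons a p' ih =>
    have h0 := hnm 0 (by simp)
    simp only [List.drop_zero] at h0
    rw [List.cons_append, drep_cons_not _ _ _ (by simpa using h0),
      ih (fun i hi => by simpa using hnm (i + 1) (by simp; omega))]
    simp

theorem head1 (c : Char) (u : List Char) : ∃ z, S1 (c :: u) = c :: z :=
  drep_cons_head _ _ _ rfl c u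
theorem head2 (c : Char) (u : List Char) : ∃ z, S2 (c :: u) = c :: z := by
  obtain ⟨z1, h1⟩ := head1 c u
  unfold S2; rw [h1]; exact drep_cons_head _ _ _ rfl c z1
theorem head3 (c : Char) (u : List Char) : ∃ z, S3 (c :: u) = c :: z := by
  obtain ⟨z1, h1⟩ := head2 c u
  unfold S3; rw [h1]; exact drep_cons_head _ _ _ rfl c z1
theorem head4 (c : Char) (u : List Char) : ∃ z, S4 (c :: u) = c :: z := by
  obtain ⟨z1, h1⟩ := head3 c u
  unfold S4; rw [h1]; exact drep_cons_head _ _ _ rfl c z1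
theorem head5 (c : Char) (u : List Char) : ∃ z, S5 (c :: u) = c :: z := by
  obtain ⟨z1, h1⟩ := head4 c u
  unfold S5; rw [h1]; exact drep_cons_head _ _ _ rfl c z1
theorem head6 (c : Char) (u : List Char) : ∃ z, S6 (c :: u) = c :: z := by
  obtain ⟨z1, h1⟩ := head5 c u
  unfold S6; rw [h1]; exact drep_cons_head _ _ _ rfl c z1
theorem head7 (c : Char) (u : List Char) : ∃ z, S7 (c :: u) = c :: z := by
  obtain ⟨z1, h1⟩ := head6 c u
  unfold S7; rw [h1]; exact drep_cons_head _ _ _ rfl c z1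
theorem head8 (c : Char) (u : List Char) : ∃ z, S8 (c :: u) = c :: z := by
  obtain ⟨z1, h1⟩ := head7 c u
  unfold S8; rw [h1]; exact drep_cons_head _ _ _ rfl c z1

theorem head9 (c : Char) (u : List Char) : ∃ z, S9 (c :: u) = c :: z := by
  obtain ⟨z1, h1⟩ := head8 c u
  unfold S9; rw [h1]; exact drep_cons_head _ _ _ rfl c z1

theorem applyAll_two (u : List Char) :
    applyAll (['t','w'] ++ 'o' :: u) = ['t','2','w'] ++ applyAll ('o' :: u) := by
  have e1 : S1 (['t','w'] ++ 'o' :: u) = ['t','w'] ++ S1 ('o' :: u) := by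
    unfold S1
    exact drep_concrete_block _ _ _ ['t','w'] _
      (by intro i hi; simp at hi; interval_cases i <;> simp [List.isPrefixOf])
  obtain ⟨z, hz⟩ := head1 'o' u
  have e2 : S2 (['t','w'] ++ 'o' :: u) = ['t','2','w'] ++ S2 ('o' :: u) := by
    unfold S2; rw [e1, hz]
    rw [show (['t','w'] ++ 'o' :: z) = 't' :: 'w' :: 'o' :: z from rfl]
    rw [drep_cons_match _ _ _ (by simp [List.isPrefixOf])]
    rw [drep_cons_not _ _ _ (by simp [List.isPrefixOf])]
    simp
  have e3 : S3 (['t','w'] ++ 'o' :: u) = ['t','2','w'] ++ S3 ('o' :: u) := by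
    unfold S3; rw [e2]
    exact drep_concrete_block _ _ _ ['t','2','w'] _
      (by intro i hi; simp at hi; interval_cases i <;> simp [List.isPrefixOf])
  have e4 : S4 (['t','w'] ++ 'o' :: u) = ['t','2','w'] ++ S4 ('o' :: u) := by
    unfold S4; rw [e3]
    exact drep_concrete_block _ _ _ ['t','2','w'] _
      (by intro i hi; simp at hi; interval_cases i <;> simp [List.isPrefixOf])
  have e5 : S5 (['t','w'] ++ 'o' :: u) = ['t','2','w'] ++ S5 ('o' :: u) := by
    unfold S5; rw [e4]
    exact drep_concrete_block _ _ _ ['t','2','w'] _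
      (by intro i hi; simp at hi; interval_cases i <;> simp [List.isPrefixOf])
  have e6 : S6 (['t','w'] ++ 'o' :: u) = ['t','2','w'] ++ S6 ('o' :: u) := by
    unfold S6; rw [e5]
    exact drep_concrete_block _ _ _ ['t','2','w'] _
      (by intro i hi; simp at hi; interval_cases i <;> simp [List.isPrefixOf])
  have e7 : S7 (['t','w'] ++ 'o' :: u) = ['t','2','w'] ++ S7 ('o' :: u) := by
    unfold S7; rw [e6]
    exact drep_concrete_block _ _ _ ['t','2','w'] _
      (by intro i hi; simp at hi; interval_cases i <;> simp [List.isPrefixOf])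
  have e8 : S8 (['t','w'] ++ 'o' :: u) = ['t','2','w'] ++ S8 ('o' :: u) := by
    unfold S8; rw [e7]
    exact drep_concrete_block _ _ _ ['t','2','w'] _
      (by intro i hi; simp at hi; interval_cases i <;> simp [List.isPrefixOf])
  have e9 : S9 (['t','w'] ++ 'o' :: u) = ['t','2','w'] ++ S9 ('o' :: u) := by
    unfold S9; rw [e8]
    exact drep_concrete_block _ _ _ ['t','2','w'] _
      (by intro i hi; simp at hi; interval_cases i <;> simp [List.isPrefixOf])
  unfold applyAll; rw [e9]
  exact drep_concrete_block _ _ _ ['t','2','w'] _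
    (by intro i hi; simp at hi; interval_cases i <;> simp [List.isPrefixOf])
theorem applyAll_one (u : List Char) :
    applyAll (['o','n'] ++ 'e' :: u) = ['o','1','n'] ++ applyAll ('e' :: u) := by
  have e1 : S1 (['o','n'] ++ 'e' :: u) = ['o','1','n'] ++ S1 ('e' :: u) := by
    unfold S1
    rw [show ['o','n'] ++ 'e' :: u = 'o'::'n'::'e'::u from rfl]
    rw [drep_cons_match _ _ _ (by simp [List.isPrefixOf])]
    rw [drep_cons_not _ _ _ (by simp [List.isPrefixOf])]
    simp
  have e2 : S2 (['o','n'] ++ 'e' :: u) = ['o','1','n'] ++ S2 ('e' :: u) := by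
    unfold S2; rw [e1]
    exact drep_concrete_block _ _ _ ['o','1','n'] _
      (by intro i hi; simp at hi; interval_cases i <;> simp [List.isPrefixOf])
  have e3 : S3 (['o','n'] ++ 'e' :: u) = ['o','1','n'] ++ S3 ('e' :: u) := by
    unfold S3; rw [e2]
    exact drep_concrete_block _ _ _ ['o','1','n'] _
      (by intro i hi; simp at hi; interval_cases i <;> simp [List.isPrefixOf])
  have e4 : S4 (['o','n'] ++ 'e' :: u) = ['o','1','n'] ++ S4 ('e' :: u) := by
    unfold S4; rw [e3]
    exact drep_concrete_block _ _ _ ['o','1','n'] _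
      (by intro i hi; simp at hi; interval_cases i <;> simp [List.isPrefixOf])
  have e5 : S5 (['o','n'] ++ 'e' :: u) = ['o','1','n'] ++ S5 ('e' :: u) := by
    unfold S5; rw [e4]
    exact drep_concrete_block _ _ _ ['o','1','n'] _
      (by intro i hi; simp at hi; interval_cases i <;> simp [List.isPrefixOf])
  have e6 : S6 (['o','n'] ++ 'e' :: u) = ['o','1','n'] ++ S6 ('e' :: u) := by
    unfold S6; rw [e5]
    exact drep_concrete_block _ _ _ ['o','1','n'] _
      (by intro i hi; simp at hi; interval_cases i <;> simp [List.isPrefixOf])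
  have e7 : S7 (['o','n'] ++ 'e' :: u) = ['o','1','n'] ++ S7 ('e' :: u) := by
    unfold S7; rw [e6]
    exact drep_concrete_block _ _ _ ['o','1','n'] _
      (by intro i hi; simp at hi; interval_cases i <;> simp [List.isPrefixOf])
  have e8 : S8 (['o','n'] ++ 'e' :: u) = ['o','1','n'] ++ S8 ('e' :: u) := by
    unfold S8; rw [e7]
    exact drep_concrete_block _ _ _ ['o','1','n'] _
      (by intro i hi; simp at hi; interval_cases i <;> simp [List.isPrefixOf])
  have e9 : S9 (['o','n'] ++ 'e' :: u) = ['o','1','n'] ++ S9 ('e' :: u) := by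
    unfold S9; rw [e8]
    obtain ⟨z, hz⟩ := head8 'e' u
    rw [hz]
    exact drep_concrete_block _ _ _ ['o','1','n'] _
      (by intro i hi; simp at hi; interval_cases i <;> simp [List.isPrefixOf])
  unfold applyAll
  rw [e9]
  exact drep_concrete_block _ _ _ ['o','1','n'] _
    (by intro i hi; simp at hi; interval_cases i <;> simp [List.isPrefixOf])

theorem applyAll_three (u : List Char) :
    applyAll (['t','h','r','e'] ++ 'e' :: u) = ['t','h','3','r','e'] ++ applyAll ('e' :: u) := by
  have e1 : S1 (['t','h','r','e'] ++ 'e' :: u) = ['t','h','r','e'] ++ S1 ('e' :: u) := by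
    unfold S1
    exact drep_concrete_block _ _ _ ['t','h','r','e'] _
      (by intro i hi; simp at hi; interval_cases i <;> simp [List.isPrefixOf])
  have e2 : S2 (['t','h','r','e'] ++ 'e' :: u) = ['t','h','r','e'] ++ S2 ('e' :: u) := by
    unfold S2; rw [e1]
    exact drep_concrete_block _ _ _ ['t','h','r','e'] _
      (by intro i hi; simp at hi; interval_cases i <;> simp [List.isPrefixOf])
  have e3 : S3 (['t','h','r','e'] ++ 'e' :: u) = ['t','h','3','r','e'] ++ S3 ('e' :: u) := by
    unfold S3; rw [e2]
    obtain ⟨z, hz⟩ := head2 'e' u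
    rw [hz]
    rw [show ['t','h','r','e'] ++ 'e' :: z = 't'::'h'::'r'::'e'::'e'::z from rfl]
    rw [drep_cons_match _ _ _ (by simp [List.isPrefixOf])]
    rw [drep_cons_not _ _ _ (by simp [List.isPrefixOf])]
    simp
  have e4 : S4 (['t','h','r','e'] ++ 'e' :: u) = ['t','h','3','r','e'] ++ S4 ('e' :: u) := by
    unfold S4; rw [e3]
    exact drep_concrete_block _ _ _ ['t','h','3','r','e'] _
      (by intro i hi; simp at hi; interval_cases i <;> simp [List.isPrefixOf])
  have e5 : S5 (['t','h','r','e'] ++ 'e' :: u) = ['t','h','3','r','e'] ++ S5 ('e' :: u) := by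
    unfold S5; rw [e4]
    exact drep_concrete_block _ _ _ ['t','h','3','r','e'] _
      (by intro i hi; simp at hi; interval_cases i <;> simp [List.isPrefixOf])
  have e6 : S6 (['t','h','r','e'] ++ 'e' :: u) = ['t','h','3','r','e'] ++ S6 ('e' :: u) := by
    unfold S6; rw [e5]
    exact drep_concrete_block _ _ _ ['t','h','3','r','e'] _
      (by intro i hi; simp at hi; interval_cases i <;> simp [List.isPrefixOf])
  have e7 : S7 (['t','h','r','e'] ++ 'e' :: u) = ['t','h','3','r','e'] ++ S7 ('e' :: u) := by
    unfold S7; rw [e6]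
    exact drep_concrete_block _ _ _ ['t','h','3','r','e'] _
      (by intro i hi; simp at hi; interval_cases i <;> simp [List.isPrefixOf])
  have e8 : S8 (['t','h','r','e'] ++ 'e' :: u) = ['t','h','3','r','e'] ++ S8 ('e' :: u) := by
    unfold S8; rw [e7]
    obtain ⟨z, hz⟩ := head7 'e' u
    rw [hz]
    exact drep_concrete_block _ _ _ ['t','h','3','r','e'] _
      (by intro i hi; simp at hi; interval_cases i <;> simp [List.isPrefixOf])
  have e9 : S9 (['t','h','r','e'] ++ 'e' :: u) = ['t','h','3','r','e'] ++ S9 ('e' :: u) := by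
    unfold S9; rw [e8]
    exact drep_concrete_block _ _ _ ['t','h','3','r','e'] _
      (by intro i hi; simp at hi; interval_cases i <;> simp [List.isPrefixOf])
  unfold applyAll
  rw [e9]
  exact drep_concrete_block _ _ _ ['t','h','3','r','e'] _
    (by intro i hi; simp at hi; interval_cases i <;> simp [List.isPrefixOf])

theorem applyAll_four (u : List Char) :
    applyAll (['f','o','u'] ++ 'r' :: u) = ['f','4','o','u'] ++ applyAll ('r' :: u) := by
  have e1 : S1 (['f','o','u'] ++ 'r' :: u) = ['f','o','u'] ++ S1 ('r' :: u) := by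
    unfold S1
    exact drep_concrete_block _ _ _ ['f','o','u'] _
      (by intro i hi; simp at hi; interval_cases i <;> simp [List.isPrefixOf])
  have e2 : S2 (['f','o','u'] ++ 'r' :: u) = ['f','o','u'] ++ S2 ('r' :: u) := by
    unfold S2; rw [e1]
    exact drep_concrete_block _ _ _ ['f','o','u'] _
      (by intro i hi; simp at hi; interval_cases i <;> simp [List.isPrefixOf])
  have e3 : S3 (['f','o','u'] ++ 'r' :: u) = ['f','o','u'] ++ S3 ('r' :: u) := by
    unfold S3; rw [e2]
    exact drep_concrete_block _ _ _ ['f','o','u'] _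
      (by intro i hi; simp at hi; interval_cases i <;> simp [List.isPrefixOf])
  have e4 : S4 (['f','o','u'] ++ 'r' :: u) = ['f','4','o','u'] ++ S4 ('r' :: u) := by
    unfold S4; rw [e3]
    obtain ⟨z, hz⟩ := head3 'r' u
    rw [hz]
    rw [show ['f','o','u'] ++ 'r' :: z = 'f'::'o'::'u'::'r'::z from rfl]
    rw [drep_cons_match _ _ _ (by simp [List.isPrefixOf])]
    rw [drep_cons_not _ _ _ (by simp [List.isPrefixOf])]
    simp
  have e5 : S5 (['f','o','u'] ++ 'r' :: u) = ['f','4','o','u'] ++ S5 ('r' :: u) := by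
    unfold S5; rw [e4]
    exact drep_concrete_block _ _ _ ['f','4','o','u'] _
      (by intro i hi; simp at hi; interval_cases i <;> simp [List.isPrefixOf])
  have e6 : S6 (['f','o','u'] ++ 'r' :: u) = ['f','4','o','u'] ++ S6 ('r' :: u) := by
    unfold S6; rw [e5]
    exact drep_concrete_block _ _ _ ['f','4','o','u'] _
      (by intro i hi; simp at hi; interval_cases i <;> simp [List.isPrefixOf])
  have e7 : S7 (['f','o','u'] ++ 'r' :: u) = ['f','4','o','u'] ++ S7 ('r' :: u) := by
    unfold S7; rw [e6]
    exact drep_concrete_block _ _ _ ['f','4','o','u'] _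
      (by intro i hi; simp at hi; interval_cases i <;> simp [List.isPrefixOf])
  have e8 : S8 (['f','o','u'] ++ 'r' :: u) = ['f','4','o','u'] ++ S8 ('r' :: u) := by
    unfold S8; rw [e7]
    exact drep_concrete_block _ _ _ ['f','4','o','u'] _
      (by intro i hi; simp at hi; interval_cases i <;> simp [List.isPrefixOf])
  have e9 : S9 (['f','o','u'] ++ 'r' :: u) = ['f','4','o','u'] ++ S9 ('r' :: u) := by
    unfold S9; rw [e8]
    exact drep_concrete_block _ _ _ ['f','4','o','u'] _
      (by intro i hi; simp at hi; interval_cases i <;> simp [List.isPrefixOf])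
  unfold applyAll
  rw [e9]
  exact drep_concrete_block _ _ _ ['f','4','o','u'] _
    (by intro i hi; simp at hi; interval_cases i <;> simp [List.isPrefixOf])

theorem applyAll_five (u : List Char) :
    applyAll (['f','i','v'] ++ 'e' :: u) = ['f','5','i','v'] ++ applyAll ('e' :: u) := by
  have e1 : S1 (['f','i','v'] ++ 'e' :: u) = ['f','i','v'] ++ S1 ('e' :: u) := by
    unfold S1
    exact drep_concrete_block _ _ _ ['f','i','v'] _
      (by intro i hi; simp at hi; interval_cases i <;> simp [List.isPrefixOf])
  have e2 : S2 (['f','i','v'] ++ 'e' :: u) = ['f','i','v'] ++ S2 ('e' :: u) := by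
    unfold S2; rw [e1]
    exact drep_concrete_block _ _ _ ['f','i','v'] _
      (by intro i hi; simp at hi; interval_cases i <;> simp [List.isPrefixOf])
  have e3 : S3 (['f','i','v'] ++ 'e' :: u) = ['f','i','v'] ++ S3 ('e' :: u) := by
    unfold S3; rw [e2]
    exact drep_concrete_block _ _ _ ['f','i','v'] _
      (by intro i hi; simp at hi; interval_cases i <;> simp [List.isPrefixOf])
  have e4 : S4 (['f','i','v'] ++ 'e' :: u) = ['f','i','v'] ++ S4 ('e' :: u) := by
    unfold S4; rw [e3]
    exact drep_concrete_block _ _ _ ['f','i','v'] _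
      (by intro i hi; simp at hi; interval_cases i <;> simp [List.isPrefixOf])
  have e5 : S5 (['f','i','v'] ++ 'e' :: u) = ['f','5','i','v'] ++ S5 ('e' :: u) := by
    unfold S5; rw [e4]
    obtain ⟨z, hz⟩ := head4 'e' u
    rw [hz]
    rw [show ['f','i','v'] ++ 'e' :: z = 'f'::'i'::'v'::'e'::z from rfl]
    rw [drep_cons_match _ _ _ (by simp [List.isPrefixOf])]
    rw [drep_cons_not _ _ _ (by simp [List.isPrefixOf])]
    simp
  have e6 : S6 (['f','i','v'] ++ 'e' :: u) = ['f','5','i','v'] ++ S6 ('e' :: u) := by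
    unfold S6; rw [e5]
    exact drep_concrete_block _ _ _ ['f','5','i','v'] _
      (by intro i hi; simp at hi; interval_cases i <;> simp [List.isPrefixOf])
  have e7 : S7 (['f','i','v'] ++ 'e' :: u) = ['f','5','i','v'] ++ S7 ('e' :: u) := by
    unfold S7; rw [e6]
    exact drep_concrete_block _ _ _ ['f','5','i','v'] _
      (by intro i hi; simp at hi; interval_cases i <;> simp [List.isPrefixOf])
  have e8 : S8 (['f','i','v'] ++ 'e' :: u) = ['f','5','i','v'] ++ S8 ('e' :: u) := by
    unfold S8; rw [e7]
    exact drep_concrete_block _ _ _ ['f','5','i','v'] _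
      (by intro i hi; simp at hi; interval_cases i <;> simp [List.isPrefixOf])
  have e9 : S9 (['f','i','v'] ++ 'e' :: u) = ['f','5','i','v'] ++ S9 ('e' :: u) := by
    unfold S9; rw [e8]
    exact drep_concrete_block _ _ _ ['f','5','i','v'] _
      (by intro i hi; simp at hi; interval_cases i <;> simp [List.isPrefixOf])
  unfold applyAll
  rw [e9]
  exact drep_concrete_block _ _ _ ['f','5','i','v'] _
    (by intro i hi; simp at hi; interval_cases i <;> simp [List.isPrefixOf])

theorem applyAll_six (u : List Char) :
    applyAll (['s','i'] ++ 'x' :: u) = ['s','6','i'] ++ applyAll ('x' :: u) := by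
  have e1 : S1 (['s','i'] ++ 'x' :: u) = ['s','i'] ++ S1 ('x' :: u) := by
    unfold S1
    exact drep_concrete_block _ _ _ ['s','i'] _
      (by intro i hi; simp at hi; interval_cases i <;> simp [List.isPrefixOf])
  have e2 : S2 (['s','i'] ++ 'x' :: u) = ['s','i'] ++ S2 ('x' :: u) := by
    unfold S2; rw [e1]
    exact drep_concrete_block _ _ _ ['s','i'] _
      (by intro i hi; simp at hi; interval_cases i <;> simp [List.isPrefixOf])
  have e3 : S3 (['s','i'] ++ 'x' :: u) = ['s','i'] ++ S3 ('x' :: u) := by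
    unfold S3; rw [e2]
    exact drep_concrete_block _ _ _ ['s','i'] _
      (by intro i hi; simp at hi; interval_cases i <;> simp [List.isPrefixOf])
  have e4 : S4 (['s','i'] ++ 'x' :: u) = ['s','i'] ++ S4 ('x' :: u) := by
    unfold S4; rw [e3]
    exact drep_concrete_block _ _ _ ['s','i'] _
      (by intro i hi; simp at hi; interval_cases i <;> simp [List.isPrefixOf])
  have e5 : S5 (['s','i'] ++ 'x' :: u) = ['s','i'] ++ S5 ('x' :: u) := by
    unfold S5; rw [e4]
    exact drep_concrete_block _ _ _ ['s','i'] _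
      (by intro i hi; simp at hi; interval_cases i <;> simp [List.isPrefixOf])
  have e6 : S6 (['s','i'] ++ 'x' :: u) = ['s','6','i'] ++ S6 ('x' :: u) := by
    unfold S6; rw [e5]
    obtain ⟨z, hz⟩ := head5 'x' u
    rw [hz]
    rw [show ['s','i'] ++ 'x' :: z = 's'::'i'::'x'::z from rfl]
    rw [drep_cons_match _ _ _ (by simp [List.isPrefixOf])]
    rw [drep_cons_not _ _ _ (by simp [List.isPrefixOf])]
    simp
  have e7 : S7 (['s','i'] ++ 'x' :: u) = ['s','6','i'] ++ S7 ('x' :: u) := by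
    unfold S7; rw [e6]
    exact drep_concrete_block _ _ _ ['s','6','i'] _
      (by intro i hi; simp at hi; interval_cases i <;> simp [List.isPrefixOf])
  have e8 : S8 (['s','i'] ++ 'x' :: u) = ['s','6','i'] ++ S8 ('x' :: u) := by
    unfold S8; rw [e7]
    exact drep_concrete_block _ _ _ ['s','6','i'] _
      (by intro i hi; simp at hi; interval_cases i <;> simp [List.isPrefixOf])
  have e9 : S9 (['s','i'] ++ 'x' :: u) = ['s','6','i'] ++ S9 ('x' :: u) := by
    unfold S9; rw [e8]
    exact drep_concrete_block _ _ _ ['s','6','i'] _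
      (by intro i hi; simp at hi; interval_cases i <;> simp [List.isPrefixOf])
  unfold applyAll
  rw [e9]
  exact drep_concrete_block _ _ _ ['s','6','i'] _
    (by intro i hi; simp at hi; interval_cases i <;> simp [List.isPrefixOf])

theorem applyAll_seven (u : List Char) :
    applyAll (['s','e','v','e'] ++ 'n' :: u) = ['s','e','7','v','e'] ++ applyAll ('n' :: u) := by
  have e1 : S1 (['s','e','v','e'] ++ 'n' :: u) = ['s','e','v','e'] ++ S1 ('n' :: u) := by
    unfold S1
    exact drep_concrete_block _ _ _ ['s','e','v','e'] _
      (by intro i hi; simp at hi; interval_cases i <;> simp [List.isPrefixOf])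
  have e2 : S2 (['s','e','v','e'] ++ 'n' :: u) = ['s','e','v','e'] ++ S2 ('n' :: u) := by
    unfold S2; rw [e1]
    exact drep_concrete_block _ _ _ ['s','e','v','e'] _
      (by intro i hi; simp at hi; interval_cases i <;> simp [List.isPrefixOf])
  have e3 : S3 (['s','e','v','e'] ++ 'n' :: u) = ['s','e','v','e'] ++ S3 ('n' :: u) := by
    unfold S3; rw [e2]
    exact drep_concrete_block _ _ _ ['s','e','v','e'] _
      (by intro i hi; simp at hi; interval_cases i <;> simp [List.isPrefixOf])
  have e4 : S4 (['s','e','v','e'] ++ 'n' :: u) = ['s','e','v','e'] ++ S4 ('n' :: u) := by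
    unfold S4; rw [e3]
    exact drep_concrete_block _ _ _ ['s','e','v','e'] _
      (by intro i hi; simp at hi; interval_cases i <;> simp [List.isPrefixOf])
  have e5 : S5 (['s','e','v','e'] ++ 'n' :: u) = ['s','e','v','e'] ++ S5 ('n' :: u) := by
    unfold S5; rw [e4]
    exact drep_concrete_block _ _ _ ['s','e','v','e'] _
      (by intro i hi; simp at hi; interval_cases i <;> simp [List.isPrefixOf])
  have e6 : S6 (['s','e','v','e'] ++ 'n' :: u) = ['s','e','v','e'] ++ S6 ('n' :: u) := by
    unfold S6; rw [e5]
    exact drep_concrete_block _ _ _ ['s','e','v','e'] _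
      (by intro i hi; simp at hi; interval_cases i <;> simp [List.isPrefixOf])
  have e7 : S7 (['s','e','v','e'] ++ 'n' :: u) = ['s','e','7','v','e'] ++ S7 ('n' :: u) := by
    unfold S7; rw [e6]
    obtain ⟨z, hz⟩ := head6 'n' u
    rw [hz]
    rw [show ['s','e','v','e'] ++ 'n' :: z = 's'::'e'::'v'::'e'::'n'::z from rfl]
    rw [drep_cons_match _ _ _ (by simp [List.isPrefixOf])]
    rw [drep_cons_not _ _ _ (by simp [List.isPrefixOf])]
    simp
  have e8 : S8 (['s','e','v','e'] ++ 'n' :: u) = ['s','e','7','v','e'] ++ S8 ('n' :: u) := by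
    unfold S8; rw [e7]
    obtain ⟨z, hz⟩ := head7 'n' u
    rw [hz]
    exact drep_concrete_block _ _ _ ['s','e','7','v','e'] _
      (by intro i hi; simp at hi; interval_cases i <;> simp [List.isPrefixOf])
  have e9 : S9 (['s','e','v','e'] ++ 'n' :: u) = ['s','e','7','v','e'] ++ S9 ('n' :: u) := by
    unfold S9; rw [e8]
    exact drep_concrete_block _ _ _ ['s','e','7','v','e'] _
      (by intro i hi; simp at hi; interval_cases i <;> simp [List.isPrefixOf])
  unfold applyAll
  rw [e9]
  exact drep_concrete_block _ _ _ ['s','e','7','v','e'] _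
    (by intro i hi; simp at hi; interval_cases i <;> simp [List.isPrefixOf])

theorem applyAll_eight (u : List Char) :
    applyAll (['e','i','g','h'] ++ 't' :: u) = ['e','i','g','8','h'] ++ applyAll ('t' :: u) := by
  have e1 : S1 (['e','i','g','h'] ++ 't' :: u) = ['e','i','g','h'] ++ S1 ('t' :: u) := by
    unfold S1
    exact drep_concrete_block _ _ _ ['e','i','g','h'] _
      (by intro i hi; simp at hi; interval_cases i <;> simp [List.isPrefixOf])
  have e2 : S2 (['e','i','g','h'] ++ 't' :: u) = ['e','i','g','h'] ++ S2 ('t' :: u) := by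
    unfold S2; rw [e1]
    exact drep_concrete_block _ _ _ ['e','i','g','h'] _
      (by intro i hi; simp at hi; interval_cases i <;> simp [List.isPrefixOf])
  have e3 : S3 (['e','i','g','h'] ++ 't' :: u) = ['e','i','g','h'] ++ S3 ('t' :: u) := by
    unfold S3; rw [e2]
    exact drep_concrete_block _ _ _ ['e','i','g','h'] _
      (by intro i hi; simp at hi; interval_cases i <;> simp [List.isPrefixOf])
  have e4 : S4 (['e','i','g','h'] ++ 't' :: u) = ['e','i','g','h'] ++ S4 ('t' :: u) := by
    unfold S4; rw [e3]
    exact drep_concrete_block _ _ _ ['e','i','g','h'] _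
      (by intro i hi; simp at hi; interval_cases i <;> simp [List.isPrefixOf])
  have e5 : S5 (['e','i','g','h'] ++ 't' :: u) = ['e','i','g','h'] ++ S5 ('t' :: u) := by
    unfold S5; rw [e4]
    exact drep_concrete_block _ _ _ ['e','i','g','h'] _
      (by intro i hi; simp at hi; interval_cases i <;> simp [List.isPrefixOf])
  have e6 : S6 (['e','i','g','h'] ++ 't' :: u) = ['e','i','g','h'] ++ S6 ('t' :: u) := by
    unfold S6; rw [e5]
    exact drep_concrete_block _ _ _ ['e','i','g','h'] _
      (by intro i hi; simp at hi; interval_cases i <;> simp [List.isPrefixOf])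
  have e7 : S7 (['e','i','g','h'] ++ 't' :: u) = ['e','i','g','h'] ++ S7 ('t' :: u) := by
    unfold S7; rw [e6]
    exact drep_concrete_block _ _ _ ['e','i','g','h'] _
      (by intro i hi; simp at hi; interval_cases i <;> simp [List.isPrefixOf])
  have e8 : S8 (['e','i','g','h'] ++ 't' :: u) = ['e','i','g','8','h'] ++ S8 ('t' :: u) := by
    unfold S8; rw [e7]
    obtain ⟨z, hz⟩ := head7 't' u
    rw [hz]
    rw [show ['e','i','g','h'] ++ 't' :: z = 'e'::'i'::'g'::'h'::'t'::z from rfl]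
    rw [drep_cons_match _ _ _ (by simp [List.isPrefixOf])]
    rw [drep_cons_not _ _ _ (by simp [List.isPrefixOf])]
    simp
  have e9 : S9 (['e','i','g','h'] ++ 't' :: u) = ['e','i','g','8','h'] ++ S9 ('t' :: u) := by
    unfold S9; rw [e8]
    exact drep_concrete_block _ _ _ ['e','i','g','8','h'] _
      (by intro i hi; simp at hi; interval_cases i <;> simp [List.isPrefixOf])
  unfold applyAll
  rw [e9]
  exact drep_concrete_block _ _ _ ['e','i','g','8','h'] _
    (by intro i hi; simp at hi; interval_cases i <;> simp [List.isPrefixOf])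

theorem applyAll_nine (u : List Char) :
    applyAll (['n','i','n'] ++ 'e' :: u) = ['n','i','9','n'] ++ applyAll ('e' :: u) := by
  have e1 : S1 (['n','i','n'] ++ 'e' :: u) = ['n','i','n'] ++ S1 ('e' :: u) := by
    unfold S1
    exact drep_concrete_block _ _ _ ['n','i','n'] _
      (by intro i hi; simp at hi; interval_cases i <;> simp [List.isPrefixOf])
  have e2 : S2 (['n','i','n'] ++ 'e' :: u) = ['n','i','n'] ++ S2 ('e' :: u) := by
    unfold S2; rw [e1]
    exact drep_concrete_block _ _ _ ['n','i','n'] _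
      (by intro i hi; simp at hi; interval_cases i <;> simp [List.isPrefixOf])
  have e3 : S3 (['n','i','n'] ++ 'e' :: u) = ['n','i','n'] ++ S3 ('e' :: u) := by
    unfold S3; rw [e2]
    exact drep_concrete_block _ _ _ ['n','i','n'] _
      (by intro i hi; simp at hi; interval_cases i <;> simp [List.isPrefixOf])
  have e4 : S4 (['n','i','n'] ++ 'e' :: u) = ['n','i','n'] ++ S4 ('e' :: u) := by
    unfold S4; rw [e3]
    exact drep_concrete_block _ _ _ ['n','i','n'] _
      (by intro i hi; simp at hi; interval_cases i <;> simp [List.isPrefixOf])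
  have e5 : S5 (['n','i','n'] ++ 'e' :: u) = ['n','i','n'] ++ S5 ('e' :: u) := by
    unfold S5; rw [e4]
    exact drep_concrete_block _ _ _ ['n','i','n'] _
      (by intro i hi; simp at hi; interval_cases i <;> simp [List.isPrefixOf])
  have e6 : S6 (['n','i','n'] ++ 'e' :: u) = ['n','i','n'] ++ S6 ('e' :: u) := by
    unfold S6; rw [e5]
    exact drep_concrete_block _ _ _ ['n','i','n'] _
      (by intro i hi; simp at hi; interval_cases i <;> simp [List.isPrefixOf])
  have e7 : S7 (['n','i','n'] ++ 'e' :: u) = ['n','i','n'] ++ S7 ('e' :: u) := by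
    unfold S7; rw [e6]
    exact drep_concrete_block _ _ _ ['n','i','n'] _
      (by intro i hi; simp at hi; interval_cases i <;> simp [List.isPrefixOf])
  have e8 : S8 (['n','i','n'] ++ 'e' :: u) = ['n','i','n'] ++ S8 ('e' :: u) := by
    unfold S8; rw [e7]
    exact drep_concrete_block _ _ _ ['n','i','n'] _
      (by intro i hi; simp at hi; interval_cases i <;> simp [List.isPrefixOf])
  have e9 : S9 (['n','i','n'] ++ 'e' :: u) = ['n','i','9','n'] ++ S9 ('e' :: u) := by
    unfold S9; rw [e8]
    obtain ⟨z, hz⟩ := head8 'e' u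
    rw [hz]
    rw [show ['n','i','n'] ++ 'e' :: z = 'n'::'i'::'n'::'e'::z from rfl]
    rw [drep_cons_match _ _ _ (by simp [List.isPrefixOf])]
    rw [drep_cons_not _ _ _ (by simp [List.isPrefixOf])]
    simp
  unfold applyAll
  rw [e9]
  exact drep_concrete_block _ _ _ ['n','i','9','n'] _
    (by intro i hi; simp at hi; interval_cases i <;> simp [List.isPrefixOf])

theorem applyAll_zero (u : List Char) :
    applyAll (['z','e','r'] ++ 'o' :: u) = ['z','e','0','r'] ++ applyAll ('o' :: u) := by
  have e1 : S1 (['z','e','r'] ++ 'o' :: u) = ['z','e','r'] ++ S1 ('o' :: u) := by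
    unfold S1
    exact drep_concrete_block _ _ _ ['z','e','r'] _
      (by intro i hi; simp at hi; interval_cases i <;> simp [List.isPrefixOf])
  have e2 : S2 (['z','e','r'] ++ 'o' :: u) = ['z','e','r'] ++ S2 ('o' :: u) := by
    unfold S2; rw [e1]
    exact drep_concrete_block _ _ _ ['z','e','r'] _
      (by intro i hi; simp at hi; interval_cases i <;> simp [List.isPrefixOf])
  have e3 : S3 (['z','e','r'] ++ 'o' :: u) = ['z','e','r'] ++ S3 ('o' :: u) := by
    unfold S3; rw [e2]
    exact drep_concrete_block _ _ _ ['z','e','r'] _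
      (by intro i hi; simp at hi; interval_cases i <;> simp [List.isPrefixOf])
  have e4 : S4 (['z','e','r'] ++ 'o' :: u) = ['z','e','r'] ++ S4 ('o' :: u) := by
    unfold S4; rw [e3]
    exact drep_concrete_block _ _ _ ['z','e','r'] _
      (by intro i hi; simp at hi; interval_cases i <;> simp [List.isPrefixOf])
  have e5 : S5 (['z','e','r'] ++ 'o' :: u) = ['z','e','r'] ++ S5 ('o' :: u) := by
    unfold S5; rw [e4]
    exact drep_concrete_block _ _ _ ['z','e','r'] _
      (by intro i hi; simp at hi; interval_cases i <;> simp [List.isPrefixOf])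
  have e6 : S6 (['z','e','r'] ++ 'o' :: u) = ['z','e','r'] ++ S6 ('o' :: u) := by
    unfold S6; rw [e5]
    exact drep_concrete_block _ _ _ ['z','e','r'] _
      (by intro i hi; simp at hi; interval_cases i <;> simp [List.isPrefixOf])
  have e7 : S7 (['z','e','r'] ++ 'o' :: u) = ['z','e','r'] ++ S7 ('o' :: u) := by
    unfold S7; rw [e6]
    exact drep_concrete_block _ _ _ ['z','e','r'] _
      (by intro i hi; simp at hi; interval_cases i <;> simp [List.isPrefixOf])
  have e8 : S8 (['z','e','r'] ++ 'o' :: u) = ['z','e','r'] ++ S8 ('o' :: u) := by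
    unfold S8; rw [e7]
    exact drep_concrete_block _ _ _ ['z','e','r'] _
      (by intro i hi; simp at hi; interval_cases i <;> simp [List.isPrefixOf])
  have e9 : S9 (['z','e','r'] ++ 'o' :: u) = ['z','e','r'] ++ S9 ('o' :: u) := by
    unfold S9; rw [e8]
    exact drep_concrete_block _ _ _ ['z','e','r'] _
      (by intro i hi; simp at hi; interval_cases i <;> simp [List.isPrefixOf])
  unfold applyAll
  rw [e9]
  obtain ⟨z, hz⟩ := head9 'o' u
  rw [hz]
  rw [show ['z','e','r'] ++ 'o' :: z = 'z'::'e'::'r'::'o'::z from rfl]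
  rw [drep_cons_match _ _ _ (by simp [List.isPrefixOf])]
  rw [drep_cons_not _ _ _ (by simp [List.isPrefixOf])]
  simp

def dval (c : Char) : Int := (c.toNat : Int) - 48

def digitVals (cs : List Char) : List Int := (cs.filter PySem.Chars.isdigit).map dval

def valOf : List Int → Int
  | [] => 0
  | x :: xs => 10 * x + ((x :: xs).getLast?.getD 0)

def firstWordAt (cs : List Char) : Option Int :=
  wordVals.findSome? (fun p => if p.1.isPrefixOf cs then some p.2 else none)

def scanVals : List Char → List Int
  | [] => []
  | c :: t =>
    (if PySem.Chars.isdigit c then [dval c] else (firstWordAt (c :: t)).toList) ++ scanVals t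

theorem scan_one (u : List Char) :
    scanVals (['o','n'] ++ 'e' :: u) = 1 :: scanVals ('e' :: u) := by
  simp [scanVals, firstWordAt, wordVals, List.findSome?, PySem.Chars.isdigit]

theorem scan_two (u : List Char) :
    scanVals (['t','w'] ++ 'o' :: u) = 2 :: scanVals ('o' :: u) := by
  simp [scanVals, firstWordAt, wordVals, List.findSome?, PySem.Chars.isdigit]

theorem scan_three (u : List Char) :
    scanVals (['t','h','r','e'] ++ 'e' :: u) = 3 :: scanVals ('e' :: u) := by
  simp [scanVals, firstWordAt, wordVals, List.findSome?, PySem.Chars.isdigit]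

theorem scan_four (u : List Char) :
    scanVals (['f','o','u'] ++ 'r' :: u) = 4 :: scanVals ('r' :: u) := by
  simp [scanVals, firstWordAt, wordVals, List.findSome?, PySem.Chars.isdigit]

theorem scan_five (u : List Char) :
    scanVals (['f','i','v'] ++ 'e' :: u) = 5 :: scanVals ('e' :: u) := by
  simp [scanVals, firstWordAt, wordVals, List.findSome?, PySem.Chars.isdigit]

theorem scan_six (u : List Char) :
    scanVals (['s','i'] ++ 'x' :: u) = 6 :: scanVals ('x' :: u) := by
  simp [scanVals, firstWordAt, wordVals, List.findSome?, PySem.Chars.isdigit]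

theorem scan_seven (u : List Char) :
    scanVals (['s','e','v','e'] ++ 'n' :: u) = 7 :: scanVals ('n' :: u) := by
  simp [scanVals, firstWordAt, wordVals, List.findSome?, PySem.Chars.isdigit]

theorem scan_eight (u : List Char) :
    scanVals (['e','i','g','h'] ++ 't' :: u) = 8 :: scanVals ('t' :: u) := by
  simp [scanVals, firstWordAt, wordVals, List.findSome?, PySem.Chars.isdigit]

theorem scan_nine (u : List Char) :
    scanVals (['n','i','n'] ++ 'e' :: u) = 9 :: scanVals ('e' :: u) := by
  simp [scanVals, firstWordAt, wordVals, List.findSome?, PySem.Chars.isdigit]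

theorem scan_zero (u : List Char) :
    scanVals (['z','e','r'] ++ 'o' :: u) = 0 :: scanVals ('o' :: u) := by
  simp [scanVals, firstWordAt, wordVals, List.findSome?, PySem.Chars.isdigit]

theorem not_prefix_of_digit {c : Char} {t : List Char} (hd : PySem.Chars.isdigit c = true)
    (w0 : Char) (ws : List Char) (hw0 : PySem.Chars.isdigit w0 = false) :
    ¬(w0 :: ws).isPrefixOf (c :: t) = true := by
  intro hp
  rw [List.isPrefixOf_iff_prefix, List.cons_prefix_cons] at hp
  rw [hp.1, hd] at hw0
  simp at hw0

theorem applyAll_nil : applyAll [] = [] := by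
  simp [applyAll, S9, S8, S7, S6, S5, S4, S3, S2, S1, drep_nil]

theorem digitVals_append (a b : List Char) : digitVals (a ++ b) = digitVals a ++ digitVals b := by
  simp [digitVals]

theorem M : ∀ (cs : List Char), digitVals (applyAll cs) = scanVals cs := by
  have main : ∀ (n : Nat) (cs : List Char), cs.length ≤ n →
      digitVals (applyAll cs) = scanVals cs := by
    intro n
    induction n with
    | zero =>
      intro cs h
      have : cs = [] := by cases cs <;> simp_all
      subst this
      simp [applyAll_nil, digitVals, scanVals]
    | succ n ih =>
      intro cs hlen
      cases cs with
      | nil => simp [applyAll_nil, digitVals, scanVals]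
      | cons c t =>
        by_cases hd : PySem.Chars.isdigit c = true
        case pos =>
          rw [applyAll_cons_noword c t
            (not_prefix_of_digit hd _ _ (by decide)) (not_prefix_of_digit hd _ _ (by decide))
            (not_prefix_of_digit hd _ _ (by decide)) (not_prefix_of_digit hd _ _ (by decide))
            (not_prefix_of_digit hd _ _ (by decide)) (not_prefix_of_digit hd _ _ (by decide))
            (not_prefix_of_digit hd _ _ (by decide)) (not_prefix_of_digit hd _ _ (by decide))
            (not_prefix_of_digit hd _ _ (by decide)) (not_prefix_of_digit hd _ _ (by decide))]
          have e : digitVals (c :: applyAll t) = dval c :: digitVals (applyAll t) := by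
            simp [digitVals, hd]
          rw [e, ih t (by simp at hlen; omega)]
          simp [scanVals, hd]
        case neg =>
          by_cases hw_one : ['o','n','e'].isPrefixOf (c :: t) = true
          case pos =>
            obtain ⟨rest, hrest⟩ := List.isPrefixOf_iff_prefix.mp hw_one
            have hsplit : c :: t = ['o','n'] ++ 'e' :: rest := by rw [← hrest]; rfl
            rw [hsplit, applyAll_one, digitVals_append, scan_one,
              ih ('e' :: rest) (by
                have hl2 : (c :: t).length = (['o','n'] ++ 'e' :: rest).length := by rw [hsplit]
                simp at hl2 hlen ⊢; omega)]
            rfl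
          case neg =>
            by_cases hw_two : ['t','w','o'].isPrefixOf (c :: t) = true
            case pos =>
              obtain ⟨rest, hrest⟩ := List.isPrefixOf_iff_prefix.mp hw_two
              have hsplit : c :: t = ['t','w'] ++ 'o' :: rest := by rw [← hrest]; rfl
              rw [hsplit, applyAll_two, digitVals_append, scan_two,
                ih ('o' :: rest) (by
                  have hl2 : (c :: t).length = (['t','w'] ++ 'o' :: rest).length := by rw [hsplit]
                  simp at hl2 hlen ⊢; omega)]
              rfl
            case neg =>
              by_cases hw_three : ['t','h','r','e','e'].isPrefixOf (c :: t) = true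
              case pos =>
                obtain ⟨rest, hrest⟩ := List.isPrefixOf_iff_prefix.mp hw_three
                have hsplit : c :: t = ['t','h','r','e'] ++ 'e' :: rest := by rw [← hrest]; rfl
                rw [hsplit, applyAll_three, digitVals_append, scan_three,
                  ih ('e' :: rest) (by
                    have hl2 : (c :: t).length = (['t','h','r','e'] ++ 'e' :: rest).length := by rw [hsplit]
                    simp at hl2 hlen ⊢; omega)]
                rfl
              case neg =>
                by_cases hw_four : ['f','o','u','r'].isPrefixOf (c :: t) = true
                case pos =>
                  obtain ⟨rest, hrest⟩ := List.isPrefixOf_iff_prefix.mp hw_four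
                  have hsplit : c :: t = ['f','o','u'] ++ 'r' :: rest := by rw [← hrest]; rfl
                  rw [hsplit, applyAll_four, digitVals_append, scan_four,
                    ih ('r' :: rest) (by
                      have hl2 : (c :: t).length = (['f','o','u'] ++ 'r' :: rest).length := by rw [hsplit]
                      simp at hl2 hlen ⊢; omega)]
                  rfl
                case neg =>
                  by_cases hw_five : ['f','i','v','e'].isPrefixOf (c :: t) = true
                  case pos =>
                    obtain ⟨rest, hrest⟩ := List.isPrefixOf_iff_prefix.mp hw_five
                    have hsplit : c :: t = ['f','i','v'] ++ 'e' :: rest := by rw [← hrest]; rfl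
                    rw [hsplit, applyAll_five, digitVals_append, scan_five,
                      ih ('e' :: rest) (by
                        have hl2 : (c :: t).length = (['f','i','v'] ++ 'e' :: rest).length := by rw [hsplit]
                        simp at hl2 hlen ⊢; omega)]
                    rfl
                  case neg =>
                    by_cases hw_six : ['s','i','x'].isPrefixOf (c :: t) = true
                    case pos =>
                      obtain ⟨rest, hrest⟩ := List.isPrefixOf_iff_prefix.mp hw_six
                      have hsplit : c :: t = ['s','i'] ++ 'x' :: rest := by rw [← hrest]; rfl
                      rw [hsplit, applyAll_six, digitVals_append, scan_six,
                        ih ('x' :: rest) (by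
                          have hl2 : (c :: t).length = (['s','i'] ++ 'x' :: rest).length := by rw [hsplit]
                          simp at hl2 hlen ⊢; omega)]
                      rfl
                    case neg =>
                      by_cases hw_seven : ['s','e','v','e','n'].isPrefixOf (c :: t) = true
                      case pos =>
                        obtain ⟨rest, hrest⟩ := List.isPrefixOf_iff_prefix.mp hw_seven
                        have hsplit : c :: t = ['s','e','v','e'] ++ 'n' :: rest := by rw [← hrest]; rfl
                        rw [hsplit, applyAll_seven, digitVals_append, scan_seven,
                          ih ('n' :: rest) (by
                            have hl2 : (c :: t).length = (['s','e','v','e'] ++ 'n' :: rest).length := by rw [hsplit]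
                            simp at hl2 hlen ⊢; omega)]
                        rfl
                      case neg =>
                        by_cases hw_eight : ['e','i','g','h','t'].isPrefixOf (c :: t) = true
                        case pos =>
                          obtain ⟨rest, hrest⟩ := List.isPrefixOf_iff_prefix.mp hw_eight
                          have hsplit : c :: t = ['e','i','g','h'] ++ 't' :: rest := by rw [← hrest]; rfl
                          rw [hsplit, applyAll_eight, digitVals_append, scan_eight,
                            ih ('t' :: rest) (by
                              have hl2 : (c :: t).length = (['e','i','g','h'] ++ 't' :: rest).length := by rw [hsplit]
                              simp at hl2 hlen ⊢; omega)]
                          rfl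
                        case neg =>
                          by_cases hw_nine : ['n','i','n','e'].isPrefixOf (c :: t) = true
                          case pos =>
                            obtain ⟨rest, hrest⟩ := List.isPrefixOf_iff_prefix.mp hw_nine
                            have hsplit : c :: t = ['n','i','n'] ++ 'e' :: rest := by rw [← hrest]; rfl
                            rw [hsplit, applyAll_nine, digitVals_append, scan_nine,
                              ih ('e' :: rest) (by
                                have hl2 : (c :: t).length = (['n','i','n'] ++ 'e' :: rest).length := by rw [hsplit]
                                simp at hl2 hlen ⊢; omega)]
                            rfl
                          case neg =>
                            by_cases hw_zero : ['z','e','r','o'].isPrefixOf (c :: t) = true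
                            case pos =>
                              obtain ⟨rest, hrest⟩ := List.isPrefixOf_iff_prefix.mp hw_zero
                              have hsplit : c :: t = ['z','e','r'] ++ 'o' :: rest := by rw [← hrest]; rfl
                              rw [hsplit, applyAll_zero, digitVals_append, scan_zero,
                                ih ('o' :: rest) (by
                                  have hl2 : (c :: t).length = (['z','e','r'] ++ 'o' :: rest).length := by rw [hsplit]
                                  simp at hl2 hlen ⊢; omega)]
                              rfl
                            case neg =>
                              rw [applyAll_cons_noword c t hw_one hw_two hw_three hw_four hw_five hw_six
                                hw_seven hw_eight hw_nine hw_zero]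
                              have e : digitVals (c :: applyAll t) = digitVals (applyAll t) := by
                                simp [digitVals, hd]
                              have hfw : firstWordAt (c :: t) = none := by
                                rw [List.isPrefixOf_iff_prefix, List.cons_prefix_cons] at hw_one hw_two hw_three hw_four hw_five hw_six hw_seven hw_eight hw_nine hw_zero
                                simp [firstWordAt, wordVals, List.findSome?, hw_one, hw_two, hw_three, hw_four,
                                  hw_five, hw_six, hw_seven, hw_eight, hw_nine, hw_zero]
                              rw [e, ih t (by simp at hlen; omega)]
                              simp [scanVals, hd, hfw]
  intro cs; exact main cs.length cs le_rfl

theorem isdigit_toNat {c : Char} (h : PySem.Chars.isdigit c = true) :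
    48 ≤ c.toNat ∧ c.toNat ≤ 57 := by
  simp [PySem.Chars.isdigit, Char.le_def] at h
  exact ⟨h.1, h.2⟩

theorem char_eq_ofNat (c : Char) : c = Char.ofNat c.toNat := by
  exact (Char.ofNat_toNat c).symm

theorem ofChars_two {a b : Char} (ha : PySem.Chars.isdigit a = true)
    (hb : PySem.Chars.isdigit b = true) :
    PySem.Int.ofChars? [a, b] = some (10 * dval a + dval b) := by
  obtain ⟨ha1, ha2⟩ := isdigit_toNat ha
  obtain ⟨hb1, hb2⟩ := isdigit_toNat hb
  rw [char_eq_ofNat a, char_eq_ofNat b]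
  unfold dval
  interval_cases (a.toNat) <;> interval_cases (b.toNat) <;> decide

theorem ofChars_one {a : Char} (ha : PySem.Chars.isdigit a = true) :
    PySem.Int.ofChars? [a] = some (dval a) := by
  obtain ⟨ha1, ha2⟩ := isdigit_toNat ha
  rw [char_eq_ofNat a]
  unfold dval
  interval_cases (a.toNat) <;> decide


theorem part1Go_eq (cs : List Char) :
    ∀ (k l e : Nat) (total : Int), e - l ≤ k → l ≤ e → e ≤ cs.length →
      part1Go cs total (l : Int) ((e : Int) - 1)
        = total + valOf (digitVals ((cs.take e).drop l)) := by
  intro k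
  induction k with
  | zero =>
    intro l e total hk hle hlen
    have : l = e := by omega
    subst this
    rw [part1Go, dif_neg (by omega)]
    simp [digitVals, valOf, List.drop_take]
  | succ k ihk =>
    intro l e total hk hle hlen
    by_cases hlt : l < e
    · have hl : l < cs.length := by omega
      have he1 : e - 1 < cs.length := by omega
      have hgl : PySem.List.pyGet? cs (l : Int) = some cs[l] := by
        rw [PySem.List.pyGet?_natCast]; simp [List.getElem?_eq_getElem hl]
      have hcast : (e : Int) - 1 = ((e - 1 : Nat) : Int) := by omega
      have hgr : PySem.List.pyGet? cs ((e : Int) - 1) = some cs[e-1] := by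
        rw [hcast, PySem.List.pyGet?_natCast]; simp [List.getElem?_eq_getElem he1]
      have hslice : (cs.take e).drop l = cs[l] :: (cs.take e).drop (l + 1) := by
        rw [List.drop_eq_getElem_cons (by simp; omega)]
        congr 1
        exact List.getElem_take
      rw [part1Go, dif_pos (by omega), hgl, hgr]
      simp only
      by_cases hA : PySem.Chars.isdigit cs[l] = false
      · rw [if_pos hA]
        have : ((l : Int) + 1) = ((l + 1 : Nat) : Int) := by omega
        rw [this, ihk (l+1) e total (by omega) (by omega) hlen]
        rw [hslice]
        simp [digitVals, hA]
      · rw [if_neg hA]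
        have htake : cs.take e = cs.take (e-1) ++ [cs[e-1]] := by
          conv_lhs => rw [show e = (e - 1) + 1 by omega]
          rw [List.take_succ]
          simp [List.getElem?_eq_getElem he1]
        by_cases hB : PySem.Chars.isdigit cs[e-1] = false
        · rw [if_pos hB]
          have : ((e : Int) - 1 - 1) = ((e - 1 : Nat) : Int) - 1 := by omega
          rw [this, ihk l (e-1) total (by omega) (by omega) (by omega)]
          congr 2
          rw [htake, List.drop_append_of_le_length (by simp; omega)]
          simp [digitVals, hB]
        · rw [if_neg hB]
          push_neg at hA hB
          simp only [Bool.not_eq_false] at hA hB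
          rw [ofChars_two hA hB]
          simp only [Option.getD_some]
          by_cases heq : l = e - 1
          · have hone : (cs.take e).drop l = [cs[l]] := by
              rw [htake, List.drop_append_of_le_length (by simp; omega)]
              have : (cs.take (e-1)).drop l = [] := by
                apply List.drop_eq_nil_of_le; simp; omega
              rw [this]
              simp [heq]
            rw [hone]
            have hab : cs[e-1] = cs[l] := by congr 1; omega
            simp [digitVals, valOf, hA, hab]
          · have hmid : (cs.take e).drop l
                = cs[l] :: ((cs.take (e-1)).drop (l+1) ++ [cs[e-1]]) := by
              rw [hslice]
              congr 1
              rw [htake, List.drop_append_of_le_length (by simp; omega)]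
            rw [hmid]
            simp only [digitVals, List.filter_cons, hA, List.filter_append,
              List.map_cons, List.map_append]
            simp [valOf, hB, List.getLast?_append]
            rw [← List.cons_append, List.getLast?_concat]
            simp
    · have : l = e := by omega
      subst this
      rw [part1Go, dif_neg (by omega)]
      simp [digitVals, valOf, List.drop_take]

def atVal : List Char → Option Int
  | [] => none
  | c :: t => if PySem.Chars.isdigit c then some (dval c) else firstWordAt (c :: t)

theorem scanVals_cons (c : Char) (t : List Char) :
    scanVals (c :: t) = (atVal (c :: t)).toList ++ scanVals t := by
  by_cases h : PySem.Chars.isdigit c = true <;> simp [scanVals, atVal, h]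

theorem valueAt_eq (cs : List Char) (i : Nat) (h : i < cs.length) :
    valueAt cs (i : Int) = atVal (cs.drop i) := by
  have hdrop : cs.drop i = cs[i] :: cs.drop (i + 1) := List.drop_eq_getElem_cons h
  unfold valueAt
  rw [PySem.List.slice_from_natCast]
  simp only [PySem.List.pyGetD_natCast, List.getD_eq_getElem _ _ h]
  by_cases hd : PySem.Chars.isdigit cs[i] = true
  · rw [if_pos hd, ofChars_one hd, hdrop]
    simp [atVal, hd]
  · rw [if_neg hd, hdrop]
    simp only [atVal, hd]
    simp [firstWordAt, PySem.Chars.startswith]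

def svN (cs : List Char) (n : Nat) : List Int :=
  (List.range n).filterMap (fun i => atVal (cs.drop i))

theorem head?_append_singleton {α : Type} (X : List α) (v : α) :
    (X ++ [v]).head? = some (X.head?.getD v) := by
  cases X <;> simp

theorem fold_fl (cs : List Char) :
    ∀ n, n ≤ cs.length →
      (PySem.List.pyRange 0 (n : Int) 1).foldl
        (fun (fl : Option Int × Option Int) i =>
          match valueAt cs i with
          | none => fl
          | some v => (some (fl.1.getD v), some v)) (none, none)
        = ((svN cs n).head?, (svN cs n).getLast?) := by
  intro n
  induction n with
  | zero =>
    intro _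
    rw [show ((0 : Nat) : Int) = 0 from rfl, PySem.List.pyRange_one_eq_nil le_rfl]
    simp [svN]
  | succ n ih =>
    intro h
    have hcast : ((n : Int) + 1) = ((n + 1 : Nat) : Int) := by omega
    rw [← hcast, PySem.List.pyRange_one_succ_right (by omega), List.foldl_append,
      ih (by omega)]
    simp only [List.foldl_cons, List.foldl_nil]
    rw [valueAt_eq cs n (by omega)]
    have hsv : svN cs (n + 1) = svN cs n ++ (atVal (cs.drop n)).toList := by
      simp [svN, List.range_succ]
      cases h' : atVal (cs.drop n) <;> simp [h']
    cases hv : atVal (cs.drop n) with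
    | none => simp [hsv, hv]
    | some v =>
      simp [hsv, hv, head?_append_singleton]

theorem svN_eq_scanVals : ∀ (cs : List Char), svN cs cs.length = scanVals cs := by
  intro cs
  induction cs with
  | nil => simp [svN, scanVals]
  | cons c t ih =>
    rw [scanVals_cons, ← ih]
    simp only [svN, List.length_cons]
    rw [List.range_succ_eq_map]
    simp only [List.filterMap_cons, List.filterMap_map]
    have : ∀ i : Nat, atVal ((c :: t).drop (i + 1)) = atVal (t.drop i) := by intro i; rfl
    cases h0 : atVal (c :: t) <;> simp [Function.comp, this, h0]

theorem final_fl (total : Int) (vs : List Int) :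
    (match vs.head?, vs.getLast? with
     | some f, some l => total + (10 * f + l)
     | _, _ => total) = total + valOf vs := by
  cases vs with
  | nil => simp [valOf]
  | cons x xs =>
    simp only [List.head?_cons, valOf]
    rw [List.getLast?_eq_some_getLast (l := x :: xs) (by simp)]
    simp

theorem line_rep (line : String) :
    (str2num.foldl (fun l p => PySem.Str.replace l p.1 p.2) line).toList
      = applyAll line.toList := by
  simp only [str2num, List.foldl]
  simp only [PySem.Str.toList_replace]
  rw [show ("one" : String).toList = ['o','n','e'] from rfl,
    show ("o1ne" : String).toList = ['o','1','n','e'] from rfl,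
    show ("two" : String).toList = ['t','w','o'] from rfl,
    show ("t2wo" : String).toList = ['t','2','w','o'] from rfl,
    show ("three" : String).toList = ['t','h','r','e','e'] from rfl,
    show ("th3ree" : String).toList = ['t','h','3','r','e','e'] from rfl,
    show ("four" : String).toList = ['f','o','u','r'] from rfl,
    show ("f4our" : String).toList = ['f','4','o','u','r'] from rfl,
    show ("five" : String).toList = ['f','i','v','e'] from rfl,
    show ("f5ive" : String).toList = ['f','5','i','v','e'] from rfl,
    show ("six" : String).toList = ['s','i','x'] from rfl,
    show ("s6ix" : String).toList = ['s','6','i','x'] from rfl,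
    show ("seven" : String).toList = ['s','e','v','e','n'] from rfl,
    show ("se7ven" : String).toList = ['s','e','7','v','e','n'] from rfl,
    show ("eight" : String).toList = ['e','i','g','h','t'] from rfl,
    show ("eig8ht" : String).toList = ['e','i','g','8','h','t'] from rfl,
    show ("nine" : String).toList = ['n','i','n','e'] from rfl,
    show ("ni9ne" : String).toList = ['n','i','9','n','e'] from rfl,
    show ("zero" : String).toList = ['z','e','r','o'] from rfl,
    show ("ze0ro" : String).toList = ['z','e','0','r','o'] from rfl]
  simp only [rep_eq]
  rfl


-- ===== assembly =====
theorem lineA (line : String) (total : Int) :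
    part1Go (str2num.foldl (fun l p => PySem.Str.replace l p.1 p.2) line).toList total 0
        (PySem.Str.len (str2num.foldl (fun l p => PySem.Str.replace l p.1 p.2) line) - 1)
      = total + valOf (scanVals line.toList) := by
  set rs := str2num.foldl (fun l p => PySem.Str.replace l p.1 p.2) line with hrs
  set cs := rs.toList with hcs
  have hlen : PySem.Str.len rs = (cs.length : Int) := rfl
  rw [hlen]
  have h0 : part1Go cs total ((0 : Nat) : Int) ((cs.length : Int) - 1)
      = total + valOf (digitVals ((cs.take cs.length).drop 0)) :=
    part1Go_eq cs cs.length 0 cs.length total (by omega) (by omega) le_rfl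
  simp only [Nat.cast_zero] at h0
  rw [h0]
  simp only [List.take_length, List.drop_zero]
  rw [hcs, hrs, line_rep line, M]

theorem lineB (line : String) (total : Int) :
    (let cs := line.toList
     let fl := (PySem.List.pyRange 0 (PySem.Str.len line) 1).foldl
       (fun (fl : Option Int × Option Int) i =>
         match valueAt cs i with
         | none => fl
         | some v => (some (fl.1.getD v), some v)) (none, none)
     match fl.1, fl.2 with
     | some f, some l => total + (10 * f + l)
     | _, _ => total)
      = total + valOf (scanVals line.toList) := by
  have hlen : PySem.Str.len line = ((line.toList.length : Nat) : Int) := rfl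
  simp only [hlen]
  rw [fold_fl line.toList line.toList.length le_rfl, svN_eq_scanVals]
  exact final_fl total (scanVals line.toList)

theorem fold_eq : ∀ (ls : List String) (total : Int),
    ls.foldl (fun total line =>
        part1Go (str2num.foldl (fun l p => PySem.Str.replace l p.1 p.2) line).toList total 0
          (PySem.Str.len (str2num.foldl (fun l p => PySem.Str.replace l p.1 p.2) line) - 1)) total
      = ls.foldl (fun total line =>
        let cs := line.toList
        let fl := (PySem.List.pyRange 0 (PySem.Str.len line) 1).foldl
          (fun (fl : Option Int × Option Int) i =>
            match valueAt cs i with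
            | none => fl
            | some v => (some (fl.1.getD v), some v)) (none, none)
        match fl.1, fl.2 with
        | some f, some l => total + (10 * f + l)
        | _, _ => total) total := by
  intro ls
  induction ls with
  | nil => intro total; rfl
  | cons line rest ih =>
    intro total
    simp only [List.foldl_cons]
    rw [lineA, ← lineB, ih]

theorem part2_eq (lines : List String) : part2 lines = part2_alt lines := by
  unfold part2 part2_alt part1
  rw [PySem.List.foldl_append_singleton_eq_map, List.nil_append, List.foldl_map]
  exact fold_eq lines 0

-- ===== VERDICT (by name: the statement is the Claim_ definition above) =====
theorem part2_spec : Claim_equal_part2 := by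
  intro lines _
  unfold Spec_part2
  exact part2_eq lines
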